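-- pv_equiv track=rewrite | github.com/GDGoC-2026/Backend | services/gamification.py | calculate_rank
-- ===== SOURCE A (Python) =====
-- def calculate_rank(level: int) -> str:
--     """Returns a string rank based on the user's level."""
--     ranks = [
--         (1, "Novice Scholar"),
--         (5, "Apprentice Learner"),
--         (10, "Adept Student"),
--         (20, "Knowledge Seeker"),
--         (35, "Master Thinker"),
--         (50, "Grandmaster Polymath"),
--         (100, "Apex Scholar")
--     ]
--     current_rank = ranks[0][1]
--     for threshold, rank_name in ranks:
--         if level >= threshold:
--             current_rank = rank_name
--         else:
--             break
--     return current_rank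
-- ===== SOURCE B (Python) =====
-- import bisect
--
-- _THRESHOLDS = [1, 5, 10, 20, 35, 50, 100]
-- _NAMES = [
--     "Novice Scholar",
--     "Apprentice Learner",
--     "Adept Student",
--     "Knowledge Seeker",
--     "Master Thinker",
--     "Grandmaster Polymath",
--     "Apex Scholar",
-- ]
--
-- def calculate_rank(level: int) -> str:
--     """Returns a string rank based on the user's level."""
--     count = bisect.bisect_right(_THRESHOLDS, level)
--     return _NAMES[max(0, count - 1)]
-- ===== Notes on version B (the rewrite author's own statement) =====
-- stated objective: idiomatic
-- what changed: Replaces the linear ascending scan with early break by a bisect_right binary search over the threshold list, indexing the rank name at max(0, count-1).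
import Mathlib
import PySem

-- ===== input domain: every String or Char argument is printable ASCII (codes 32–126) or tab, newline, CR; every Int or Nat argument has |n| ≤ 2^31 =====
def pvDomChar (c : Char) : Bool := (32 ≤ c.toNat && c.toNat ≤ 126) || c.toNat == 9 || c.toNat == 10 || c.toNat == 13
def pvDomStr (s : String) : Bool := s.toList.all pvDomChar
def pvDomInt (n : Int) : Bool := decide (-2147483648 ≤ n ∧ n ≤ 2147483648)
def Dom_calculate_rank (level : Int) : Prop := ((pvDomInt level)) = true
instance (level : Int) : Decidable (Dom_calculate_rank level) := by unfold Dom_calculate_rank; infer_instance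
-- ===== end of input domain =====

-- B replaces A's linear scan-with-break by a bisect_right (count of thresholds ≤ level) index lookup; objective: idiomatic.


-- ===== PORT A =====
-- loop with early break over (threshold, name) pairs, carrying current_rank
def pvRankLoop (level : Int) : List (Int × String) → String → String
  | [], cur => cur
  | (t, r) :: rest, cur => if level ≥ t then pvRankLoop level rest r else cur

def calculate_rank (level : Int) : String :=
  let ranks : List (Int × String) :=
    [(1, "Novice Scholar"), (5, "Apprentice Learner"), (10, "Adept Student"),
     (20, "Knowledge Seeker"), (35, "Master Thinker"), (50, "Grandmaster Polymath"),
     (100, "Apex Scholar")]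
  pvRankLoop level ranks (ranks.headD (0, "")).2

-- ===== PORT B =====
-- bisect.bisect_right on the sorted thresholds = number of thresholds ≤ level (library call ported by its Lean counterpart)
def calculate_rank_alt (level : Int) : String :=
  let thresholds : List Int := [1, 5, 10, 20, 35, 50, 100]
  let names : List String :=
    ["Novice Scholar", "Apprentice Learner", "Adept Student", "Knowledge Seeker",
     "Master Thinker", "Grandmaster Polymath", "Apex Scholar"]
  let count := thresholds.countP (fun t => decide (t ≤ level))
  names.getD (max 0 (count - 1)) ""

-- ===== PRECONDITION & SPEC =====
def Spec_calculate_rank (level : Int) (out : String) : Prop := out = calculate_rank_alt level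
instance (level : Int) (out : String) : Decidable (Spec_calculate_rank level out) := by unfold Spec_calculate_rank; infer_instance

-- ===== CLAIM (what is proved, stated in full; the proofs are below) =====
def Claim_equal_calculate_rank : Prop := ∀ (level : Int), Dom_calculate_rank level → Spec_calculate_rank level (calculate_rank level)

-- ===== LEMMAS AND PROOFS =====

-- ===== VERDICT (by name: the statement is the Claim_ definition above) =====
theorem calculate_rank_spec : Claim_equal_calculate_rank := by
  intro level _
  unfold Spec_calculate_rank calculate_rank calculate_rank_alt
  simp only [pvRankLoop, List.countP, List.countP.go, ge_iff_le]
  by_cases h1 : (1:Int) ≤ level <;> by_cases h5 : (5:Int) ≤ level <;>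
  by_cases h10 : (10:Int) ≤ level <;> by_cases h20 : (20:Int) ≤ level <;>
  by_cases h35 : (35:Int) ≤ level <;> by_cases h50 : (50:Int) ≤ level <;>
  by_cases h100 : (100:Int) ≤ level <;>
    first
    | (exfalso; omega)
    | simp [h1, h5, h10, h20, h35, h50, h100]
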